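-- pv_equiv track=rewrite | github.com/mbriceno/python_problems | test_python_07062024.py | intersection_sum
-- ===== SOURCE A (Python) =====
-- from functools import reduce
--
-- def sum_digits(s1: int, s2: int) -> tuple[int, int]:
--     return (
--         int(reduce(lambda x, y: int(x) + int(y), str(s1))),
--         int(reduce(lambda w, z: int(w) + int(z), str(s2)))
--     )
--
-- def intersection_sum(s1: int, s2:  int) -> int:
--
--     sum_s1, sum_s2 = sum_digits(s1, s2)
--
--     list_s1 = []
--     list_s2 = []
--
--     for i in range(0,  20000000):
--         s1 = s1 + sum_s1
--         list_s1.append(s1)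
--         s2 = s2 + sum_s2
--         list_s2.append(s2)
--
--         if s1 in list_s2:
--             return s1
--
--         if s2 in list_s1:
--             return s2
--
--         sum_s1, sum_s2 = sum_digits(s1, s2)
--     else:
--         return 0
-- ===== SOURCE B (Python) =====
-- def intersection_sum(s1: int, s2: int) -> int:
--     def digit_sum(n: int) -> int:
--         return sum(int(c) for c in str(n))
--
--     def river(n: int) -> int:
--         # each step maps a term t to t + digit_sum(t) == 2*t (mod 9), so the mod-9
--         # residue of every term stays inside the doubling orbit ('river') of n % 9:
--         # {1,2,4,8,7,5}, {3,6} or {0} (with the constant value 0 on its own)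
--         if n == 0:
--             return 3
--         r = n % 9
--         if r == 0:
--             return 2
--         if r in (3, 6):
--             return 1
--         return 0
--
--     if river(s1) != river(s2):
--         # sequences from different rivers never share a value: the search cannot succeed
--         return 0
--     N = 20000000
--     a = s1 + digit_sum(s1)
--     b = s2 + digit_sum(s2)
--     i = j = 1
--     while a != b:
--         if a < b:
--             if i == N:
--                 return 0
--             a += digit_sum(a)
--             i += 1
--         else:
--             if j == N:
--                 return 0
--             b += digit_sum(b)
--             j += 1
--     return a
-- ===== Notes on version B (the rewrite author's own statement) =====
-- stated objective: alternative
-- what changed: Replaces A's two ever-growing lists with an `in`-scan per step by a mod-9 'river' test that returns 0 at once when the two digit-sum sequences provably never share a value (each step doubles the term mod 9), and otherwise a two-pointer walk that keeps only the current term of each increasing sequence, advancing the smaller side until the first equal pair or a cursor reaches 20000000.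
import Mathlib
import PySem

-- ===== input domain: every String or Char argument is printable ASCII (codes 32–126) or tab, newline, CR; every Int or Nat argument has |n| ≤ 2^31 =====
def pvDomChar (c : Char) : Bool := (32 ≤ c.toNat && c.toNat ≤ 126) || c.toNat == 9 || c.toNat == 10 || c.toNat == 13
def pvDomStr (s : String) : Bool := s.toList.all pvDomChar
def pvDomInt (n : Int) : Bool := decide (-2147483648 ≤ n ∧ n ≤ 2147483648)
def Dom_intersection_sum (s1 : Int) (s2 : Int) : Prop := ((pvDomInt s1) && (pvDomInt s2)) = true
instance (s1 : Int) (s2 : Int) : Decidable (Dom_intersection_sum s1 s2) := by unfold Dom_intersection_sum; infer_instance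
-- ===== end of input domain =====

-- B replaces A's two ever-growing lists with per-step membership scans by a mod-9 'river'
-- test that returns 0 at once when the two sequences provably never share a value, and
-- otherwise a two-pointer walk over the two increasing sequences (advance the smaller side,
-- keep only the current term of each); same return value, no observable side effects.

-- ===== PORT A =====
-- int(reduce(lambda x, y: int(x) + int(y), str(s))); int(c) is ported as c.toNat - 48,
-- exact on digit chars (for negative s Python raises ValueError on '-'; excluded by Pre_).
def pvReduceDigits (s : Int) : Int :=
  match (PySem.Int.toStr s).toList with
  | [] => 0  -- unreachable: str(n) is never empty
  | c :: rest => rest.foldl (fun x y => x + ((y.toNat : Int) - 48)) ((c.toNat : Int) - 48)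

def sum_digits (s1 : Int) (s2 : Int) : Int × Int :=
  (pvReduceDigits s1, pvReduceDigits s2)

def loopA (n : Nat) (s1 s2 sum1 sum2 : Int) (l1 l2 : List Int) : Int :=
  match n with
  | 0 => 0  -- for-else: loop exhausted, return 0
  | Nat.succ m =>
    let s1' := s1 + sum1
    let l1' := l1 ++ [s1']
    let s2' := s2 + sum2
    let l2' := l2 ++ [s2']
    if s1' ∈ l2' then s1'
    else if s2' ∈ l1' then s2'
    else
      let p := sum_digits s1' s2'
      loopA m s1' s2' p.1 p.2 l1' l2'

def intersection_sum (s1 : Int) (s2 : Int) : Int :=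
  let p := sum_digits s1 s2
  loopA 20000000 s1 s2 p.1 p.2 [] []

-- ===== PORT B =====
-- sum(int(c) for c in str(n)), same int(c) convention as A's port
def digit_sum (n : Int) : Int :=
  ((PySem.Int.toStr n).toList.map (fun c => ((c.toNat : Int) - 48))).sum

-- the while loop; the fuel only makes the recursion structural and is never exhausted
-- on the states the program reaches (each call increments i or j, both capped at 20000000)
def loopB (fuel : Nat) (a b : Int) (i j : Nat) : Int :=
  match fuel with
  | 0 => 0
  | Nat.succ m =>
    if a = b then a
    else if a < b then
      if i = 20000000 then 0 else loopB m (a + digit_sum a) b (i + 1) j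
    else
      if j = 20000000 then 0 else loopB m a (b + digit_sum b) i (j + 1)

-- n % 9 in Python: divisor 9 > 0, so Python's floor-mod agrees with Lean's Int.emod '%'
def pvRiver (n : Int) : Int :=
  if n = 0 then 3
  else if n % 9 = 0 then 2
  else if n % 9 = 3 ∨ n % 9 = 6 then 1
  else 0

def intersection_sum_alt (s1 : Int) (s2 : Int) : Int :=
  if pvRiver s1 ≠ pvRiver s2 then 0
  else loopB 40000000 (s1 + digit_sum s1) (s2 + digit_sum s2) 1 1

-- ===== PRECONDITION & SPEC =====
-- Pre_ excludes exactly the negative arguments: there Python A raises ValueError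
-- (int('-') inside sum_digits on the sign character of str(n)) and returns no value.
def Pre_intersection_sum (s1 : Int) (s2 : Int) : Prop := 0 ≤ s1 ∧ 0 ≤ s2

instance (s1 : Int) (s2 : Int) : Decidable (Pre_intersection_sum s1 s2) := by
  unfold Pre_intersection_sum; infer_instance

def pvWitness_intersection_sum : Int × Int := (8, 26)

def Spec_intersection_sum (s1 : Int) (s2 : Int) (out : Int) : Prop := out = intersection_sum_alt s1 s2
instance (s1 : Int) (s2 : Int) (out : Int) : Decidable (Spec_intersection_sum s1 s2 out) := by unfold Spec_intersection_sum; infer_instance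

-- ===== CLAIM (what is proved, stated in full; the proofs are below) =====
def Claim_equal_intersection_sum : Prop := ∀ (s1 : Int) (s2 : Int), Dom_intersection_sum s1 s2 → Pre_intersection_sum s1 s2 → Spec_intersection_sum s1 s2 (intersection_sum s1 s2)

-- ===== LEMMAS AND PROOFS =====

def pvCharSum (l : List Char) : Int := (l.map (fun c => ((c.toNat : Int) - 48))).sum

theorem pvFoldl_charSum (l : List Char) (init : Int) :
    l.foldl (fun x y => x + ((y.toNat : Int) - 48)) init = init + pvCharSum l := by
  induction l generalizing init with
  | nil => simp [pvCharSum]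
  | cons c rest ih => simp only [List.foldl, pvCharSum, List.map, List.sum_cons] at *; rw [ih]; ring

theorem pvReduce_eq (s : Int) : pvReduceDigits s = digit_sum s := by
  unfold pvReduceDigits digit_sum
  cases h : (PySem.Int.toStr s).toList with
  | nil => simp [h]
  | cons c rest => simp only [h, pvFoldl_charSum, pvCharSum, List.map, List.sum_cons]

theorem pvDigitChar_toNat (d : ℕ) (h : d < 10) : ((d.digitChar.toNat : Int) - 48) = d := by
  interval_cases d <;> rfl

theorem pvCore_sum : ∀ (f n : ℕ) (ds : List Char), n < 10 ^ f →
    pvCharSum (Nat.toDigitsCore 10 f n ds) = ((Nat.digits 10 n).sum : Int) + pvCharSum ds := by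
  intro f
  induction f with
  | zero =>
    intro n ds h
    have hn : n = 0 := by simpa using h
    simp [Nat.toDigitsCore, hn]
  | succ f ih =>
    intro n ds h
    simp only [Nat.toDigitsCore]
    by_cases h0 : n / 10 = 0
    · rw [if_pos h0]
      have := pvDigitChar_toNat (n % 10) (Nat.mod_lt _ (by norm_num))
      simp only [pvCharSum, List.map, List.sum_cons, this]
      rcases Nat.eq_zero_or_pos n with hn0 | hnp
      · simp [hn0, pvCharSum]
      · rw [Nat.digits_def' (by norm_num : (1:ℕ) < 10) hnp, h0]
        simp [pvCharSum]
    · rw [if_neg h0]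
      have hdiv : n / 10 < 10 ^ f := by
        rw [Nat.div_lt_iff_lt_mul (by norm_num)]
        calc n < 10 ^ (f+1) := h
        _ = 10 ^ f * 10 := by ring
      rw [ih _ _ hdiv]
      have hnp : 0 < n := by omega
      rw [Nat.digits_def' (by norm_num : (1:ℕ) < 10) hnp]
      have := pvDigitChar_toNat (n % 10) (Nat.mod_lt _ (by norm_num))
      simp only [pvCharSum, List.map, List.sum_cons, this]
      push_cast
      ring

theorem pvDs_eq (x : Int) (hx : 0 ≤ x) :
    digit_sum x = ((Nat.digits 10 x.toNat).sum : Int) := by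
  have hcs : digit_sum x = pvCharSum (PySem.Int.toChars x) := by
    unfold digit_sum pvCharSum; rw [PySem.Int.toList_toStr]
  rw [hcs]
  unfold PySem.Int.toChars
  rw [if_neg (by omega)]
  unfold Nat.toDigits
  rw [pvCore_sum _ _ _ (by
    calc x.toNat < 2 ^ (x.toNat + 1) := Nat.lt_two_pow_self.trans (by
      exact Nat.pow_lt_pow_right (by norm_num) (Nat.lt_succ_self _))
    _ ≤ 10 ^ (x.toNat + 1) := Nat.pow_le_pow_left (by norm_num) _)]
  simp [pvCharSum]

theorem pvDigits_sum_pos : ∀ m : ℕ, 1 ≤ m → 1 ≤ (Nat.digits 10 m).sum := by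
  intro m
  induction m using Nat.strong_induction_on with
  | _ m ih =>
    intro hm
    rw [Nat.digits_def' (by norm_num : (1:ℕ) < 10) (by omega)]
    simp only [List.sum_cons]
    by_cases h : m % 10 = 0
    · have h1 : 1 ≤ m / 10 := by omega
      have := ih (m / 10) (by omega) h1
      omega
    · omega

theorem pvDs_pos (x : Int) (hx : 1 ≤ x) : 1 ≤ digit_sum x := by
  rw [pvDs_eq x (by omega)]
  exact_mod_cast pvDigits_sum_pos x.toNat (by omega)

def pvStep (x : Int) : Int := x + digit_sum x

theorem pvSeq_ge (s : Int) (hs : 1 ≤ s) : ∀ k : ℕ, 1 ≤ pvStep^[k] s := by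
  intro k; induction k with
  | zero => simpa using hs
  | succ k ih =>
    rw [Function.iterate_succ_apply']
    have := pvDs_pos _ ih
    have heq : pvStep (pvStep^[k] s) = pvStep^[k] s + digit_sum (pvStep^[k] s) := rfl
    rw [heq]; omega

theorem pvSeq_strictMono (s : Int) (hs : 1 ≤ s) : StrictMono (fun k => pvStep^[k] s) := by
  apply strictMono_nat_of_lt_succ
  intro k
  have h1 := pvSeq_ge s hs k
  have := pvDs_pos _ h1
  simp only [Function.iterate_succ_apply']
  have heq : pvStep (pvStep^[k] s) = pvStep^[k] s + digit_sum (pvStep^[k] s) := rfl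
  rw [heq]; omega

theorem pvSeq_lt (s : Int) (hs : 1 ≤ s) {k l : ℕ} (h : k < l) :
    pvStep^[k] s < pvStep^[l] s := pvSeq_strictMono s hs h

theorem pvSeq_le (s : Int) (hs : 1 ≤ s) {k l : ℕ} (h : k ≤ l) :
    pvStep^[k] s ≤ pvStep^[l] s := (pvSeq_strictMono s hs).monotone h

theorem pvSeq_lt_iff (s : Int) (hs : 1 ≤ s) {k l : ℕ} :
    pvStep^[k] s < pvStep^[l] s ↔ k < l := (pvSeq_strictMono s hs).lt_iff_lt

def pvCommon (s1 s2 w : Int) : Prop :=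
  ∃ m n : ℕ, 1 ≤ m ∧ m ≤ 20000000 ∧ 1 ≤ n ∧ n ≤ 20000000 ∧
    pvStep^[m] s1 = w ∧ pvStep^[n] s2 = w

def pvIsRes (s1 s2 r : Int) : Prop :=
  (pvCommon s1 s2 r ∧ ∀ w, pvCommon s1 s2 w → r ≤ w) ∨ ((∀ w, ¬ pvCommon s1 s2 w) ∧ r = 0)

theorem pvIsRes_unique (s1 s2 r1 r2 : Int) (h1 : pvIsRes s1 s2 r1) (h2 : pvIsRes s1 s2 r2) :
    r1 = r2 := by
  rcases h1 with ⟨hc1, hm1⟩ | ⟨hn1, he1⟩ <;> rcases h2 with ⟨hc2, hm2⟩ | ⟨hn2, he2⟩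
  · exact le_antisymm (hm1 _ hc2) (hm2 _ hc1)
  · exact absurd hc1 (hn2 _)
  · exact absurd hc2 (hn1 _)
  · rw [he1, he2]

theorem pvLoopA_correct (s1 s2 : Int) (h1 : 1 ≤ s1) (h2 : 1 ≤ s2) :
    ∀ (k t : ℕ), k + t = 20000000 →
    (∀ m n : ℕ, 1 ≤ m → m ≤ t → 1 ≤ n → n ≤ t → pvStep^[m] s1 ≠ pvStep^[n] s2) →
    pvIsRes s1 s2 (loopA k (pvStep^[t] s1) (pvStep^[t] s2)
      (pvReduceDigits (pvStep^[t] s1)) (pvReduceDigits (pvStep^[t] s2))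
      ((List.range t).map (fun u => pvStep^[u+1] s1))
      ((List.range t).map (fun u => pvStep^[u+1] s2))) := by
  intro k
  induction k with
  | zero =>
    intro t ht hne
    simp only [loopA]
    right
    refine ⟨?_, rfl⟩
    rintro w ⟨m, n, hm1, hmN, hn1, hnN, hw1, hw2⟩
    exact hne m n hm1 (by omega) hn1 (by omega) (hw1.trans hw2.symm)
  | succ k ih =>
    intro t ht hne
    simp only [loopA]
    have hstep1 : pvStep^[t] s1 + pvReduceDigits (pvStep^[t] s1) = pvStep^[t+1] s1 := by
      rw [pvReduce_eq, Function.iterate_succ_apply']; rfl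
    have hstep2 : pvStep^[t] s2 + pvReduceDigits (pvStep^[t] s2) = pvStep^[t+1] s2 := by
      rw [pvReduce_eq, Function.iterate_succ_apply']; rfl
    rw [hstep1, hstep2]
    have hmem1 : ∀ x : Int,
        x ∈ (List.range t).map (fun u => pvStep^[u+1] s1) ++ [pvStep^[t+1] s1] ↔
        ∃ m : ℕ, 1 ≤ m ∧ m ≤ t + 1 ∧ pvStep^[m] s1 = x := by
      intro x
      simp only [List.mem_append, List.mem_map, List.mem_range, List.mem_singleton]
      constructor
      · rintro (⟨u, hu, he⟩ | he)
        · exact ⟨u + 1, by omega, by omega, he⟩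
        · exact ⟨t + 1, by omega, by omega, he.symm⟩
      · rintro ⟨m, hm1, hmle, he⟩
        rcases m with _ | u
        · omega
        · by_cases hu : u < t
          · exact Or.inl ⟨u, hu, he⟩
          · have : u = t := by omega
            subst this
            exact Or.inr he.symm
    have hmem2 : ∀ x : Int,
        x ∈ (List.range t).map (fun u => pvStep^[u+1] s2) ++ [pvStep^[t+1] s2] ↔
        ∃ n : ℕ, 1 ≤ n ∧ n ≤ t + 1 ∧ pvStep^[n] s2 = x := by
      intro x
      simp only [List.mem_append, List.mem_map, List.mem_range, List.mem_singleton]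
      constructor
      · rintro (⟨u, hu, he⟩ | he)
        · exact ⟨u + 1, by omega, by omega, he⟩
        · exact ⟨t + 1, by omega, by omega, he.symm⟩
      · rintro ⟨n, hn1, hnle, he⟩
        rcases n with _ | u
        · omega
        · by_cases hu : u < t
          · exact Or.inl ⟨u, hu, he⟩
          · have : u = t := by omega
            subst this
            exact Or.inr he.symm
    by_cases hin1 : pvStep^[t+1] s1 ∈
        (List.range t).map (fun u => pvStep^[u+1] s2) ++ [pvStep^[t+1] s2]
    · rw [if_pos hin1]
      obtain ⟨n, hn1, hnle, he⟩ := (hmem2 _).mp hin1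
      left
      refine ⟨⟨t + 1, n, by omega, by omega, hn1, by omega, rfl, he⟩, ?_⟩
      intro w hw
      by_contra hlt
      push_neg at hlt
      obtain ⟨m', n', hm1', hmN', hn1', hnN', hw1, hw2⟩ := hw
      have hmlt : m' < t + 1 := by
        rw [← pvSeq_lt_iff s1 h1]
        rw [hw1]; exact hlt
      have hnlt : n' < n := by
        rw [← pvSeq_lt_iff s2 h2]
        rw [hw2, he]; exact hlt
      exact hne m' n' hm1' (by omega) hn1' (by omega) (hw1.trans hw2.symm)
    · rw [if_neg hin1]
      by_cases hin2 : pvStep^[t+1] s2 ∈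
          (List.range t).map (fun u => pvStep^[u+1] s1) ++ [pvStep^[t+1] s1]
      · rw [if_pos hin2]
        obtain ⟨m, hm1, hmle, he⟩ := (hmem1 _).mp hin2
        left
        refine ⟨⟨m, t + 1, hm1, by omega, by omega, by omega, he, rfl⟩, ?_⟩
        intro w hw
        by_contra hlt
        push_neg at hlt
        obtain ⟨m', n', hm1', hmN', hn1', hnN', hw1, hw2⟩ := hw
        have hnlt : n' < t + 1 := by
          rw [← pvSeq_lt_iff s2 h2]
          rw [hw2]; exact hlt
        have hmlt : m' < m := by
          rw [← pvSeq_lt_iff s1 h1]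
          rw [hw1, he]; exact hlt
        exact hne m' n' hm1' (by omega) hn1' (by omega) (hw1.trans hw2.symm)
      · rw [if_neg hin2]
        have hl1eq : (List.range (t+1)).map (fun u => pvStep^[u+1] s1) =
            (List.range t).map (fun u => pvStep^[u+1] s1) ++ [pvStep^[t+1] s1] := by
          rw [List.range_succ, List.map_append]; rfl
        have hl2eq : (List.range (t+1)).map (fun u => pvStep^[u+1] s2) =
            (List.range t).map (fun u => pvStep^[u+1] s2) ++ [pvStep^[t+1] s2] := by
          rw [List.range_succ, List.map_append]; rfl
        have hne' : ∀ m n : ℕ, 1 ≤ m → m ≤ t + 1 → 1 ≤ n → n ≤ t + 1 →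
            pvStep^[m] s1 ≠ pvStep^[n] s2 := by
          intro m n hm1 hmle hn1 hnle hcon
          by_cases hm : m ≤ t
          · by_cases hn : n ≤ t
            · exact hne m n hm1 hm hn1 hn hcon
            · have hn' : n = t + 1 := by omega
              apply hin2
              rw [hmem1]
              exact ⟨m, hm1, by omega, by rw [hcon, hn']⟩
          · have hm' : m = t + 1 := by omega
            apply hin1
            rw [hmem2]
            exact ⟨n, hn1, hnle, by rw [← hcon, hm']⟩
        have := ih (t + 1) (by omega) hne'
        rw [hl1eq, hl2eq] at this
        simpa [sum_digits] using this

theorem pvLoopB_correct (s1 s2 : Int) (h1 : 1 ≤ s1) (h2 : 1 ≤ s2) :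
    ∀ (fuel i j : ℕ), 1 ≤ i → i ≤ 20000000 → 1 ≤ j → j ≤ 20000000 →
    40000002 ≤ fuel + i + j →
    (∀ m n : ℕ, 1 ≤ m → m ≤ i → 1 ≤ n → n ≤ j → (m ≠ i ∨ n ≠ j) →
      pvStep^[m] s1 ≠ pvStep^[n] s2) →
    (∀ n : ℕ, 1 ≤ n → n < j → pvStep^[n] s2 < pvStep^[i] s1) →
    (∀ m : ℕ, 1 ≤ m → m < i → pvStep^[m] s1 < pvStep^[j] s2) →
    pvIsRes s1 s2 (loopB fuel (pvStep^[i] s1) (pvStep^[j] s2) i j) := by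
  intro fuel
  induction fuel with
  | zero =>
    intro i j hi hiN hj hjN hfuel hne hl1 hl2
    omega
  | succ fu ih =>
    intro i j hi hiN hj hjN hfuel hne hl1 hl2
    simp only [loopB]
    by_cases hab : pvStep^[i] s1 = pvStep^[j] s2
    · rw [if_pos hab]
      left
      refine ⟨⟨i, j, hi, hiN, hj, hjN, rfl, hab.symm⟩, ?_⟩
      intro w hw
      by_contra hlt
      push_neg at hlt
      obtain ⟨m', n', hm1, hmN, hn1, hnN, hw1, hw2⟩ := hw
      have hmi : m' < i := by
        rw [← pvSeq_lt_iff s1 h1]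
        rw [hw1]; exact hlt
      have hnj : n' < j := by
        rw [← pvSeq_lt_iff s2 h2]
        rw [hw2, ← hab]; exact hlt
      exact hne m' n' hm1 (by omega) hn1 (by omega) (Or.inl (by omega)) (hw1.trans hw2.symm)
    · rw [if_neg hab]
      by_cases hltb : pvStep^[i] s1 < pvStep^[j] s2
      · rw [if_pos hltb]
        by_cases hiN' : i = 20000000
        · rw [if_pos hiN']
          right
          refine ⟨?_, rfl⟩
          rintro w ⟨m', n', hm1, hmN, hn1, hnN, hw1, hw2⟩
          by_cases hnj : n' ≤ j
          · by_cases hp : m' = i ∧ n' = j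
            · exact hab (by rw [← hp.1, ← hp.2, hw1, hw2])
            · have hor : m' ≠ i ∨ n' ≠ j := by tauto
              exact hne m' n' hm1 (by omega) hn1 hnj hor (hw1.trans hw2.symm)
          · have hgt : pvStep^[j] s2 < w := by
              rw [← hw2]; exact pvSeq_lt s2 h2 (by omega)
            have hle : w ≤ pvStep^[i] s1 := by
              rw [← hw1]; exact pvSeq_le s1 h1 (by omega)
            omega
        · rw [if_neg hiN']
          have hstep : pvStep^[i] s1 + digit_sum (pvStep^[i] s1) = pvStep^[i+1] s1 := by
            rw [Function.iterate_succ_apply']; rfl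
          rw [hstep]
          apply ih (i+1) j (by omega) (by omega) hj hjN (by omega)
          · intro m' n' hm1 hmI hn1 hnJ hor
            by_cases hmi : m' ≤ i
            · by_cases hp : m' = i ∧ n' = j
              · rw [hp.1, hp.2]; exact hab
              · have hor' : m' ≠ i ∨ n' ≠ j := by tauto
                exact hne m' n' hm1 hmi hn1 hnJ hor'
            · have hm' : m' = i + 1 := by omega
              have hn' : n' < j := by
                rcases hor with h | h
                · omega
                · omega
              intro hcon
              have hlt1 : pvStep^[n'] s2 < pvStep^[i] s1 := hl1 n' hn1 hn'
              have hlt2 : pvStep^[i] s1 < pvStep^[i+1] s1 := pvSeq_lt s1 h1 (by omega)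
              rw [hm'] at hcon
              omega
          · intro n' hn1 hn'
            have := hl1 n' hn1 hn'
            have h2' : pvStep^[i] s1 < pvStep^[i+1] s1 := pvSeq_lt s1 h1 (by omega)
            omega
          · intro m' hm1 hm'
            by_cases hmi : m' < i
            · exact hl2 m' hm1 hmi
            · have : m' = i := by omega
              rw [this]; exact hltb
      · rw [if_neg hltb]
        have hba : pvStep^[j] s2 < pvStep^[i] s1 := by omega
        by_cases hjN' : j = 20000000
        · rw [if_pos hjN']
          right
          refine ⟨?_, rfl⟩
          rintro w ⟨m', n', hm1, hmN, hn1, hnN, hw1, hw2⟩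
          by_cases hmi : m' ≤ i
          · by_cases hp : m' = i ∧ n' = j
            · exact hab (by rw [← hp.1, ← hp.2, hw1, hw2])
            · have hor : m' ≠ i ∨ n' ≠ j := by tauto
              exact hne m' n' hm1 hmi hn1 (by omega) hor (hw1.trans hw2.symm)
          · have hgt : pvStep^[i] s1 < w := by
              rw [← hw1]; exact pvSeq_lt s1 h1 (by omega)
            have hle : w ≤ pvStep^[j] s2 := by
              rw [← hw2]; exact pvSeq_le s2 h2 (by omega)
            omega
        · rw [if_neg hjN']
          have hstep : pvStep^[j] s2 + digit_sum (pvStep^[j] s2) = pvStep^[j+1] s2 := by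
            rw [Function.iterate_succ_apply']; rfl
          rw [hstep]
          apply ih i (j+1) hi hiN (by omega) (by omega) (by omega)
          · intro m' n' hm1 hmI hn1 hnJ hor
            by_cases hnj : n' ≤ j
            · by_cases hp : m' = i ∧ n' = j
              · rw [hp.1, hp.2]; exact hab
              · have hor' : m' ≠ i ∨ n' ≠ j := by tauto
                exact hne m' n' hm1 hmI hn1 hnj hor'
            · have hn' : n' = j + 1 := by omega
              have hm' : m' < i := by
                rcases hor with h | h
                · omega
                · omega
              intro hcon
              have hlt1 : pvStep^[m'] s1 < pvStep^[j] s2 := hl2 m' hm1 hm'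
              have hlt2 : pvStep^[j] s2 < pvStep^[j+1] s2 := pvSeq_lt s2 h2 (by omega)
              rw [hn'] at hcon
              omega
          · intro n' hn1 hn'
            by_cases hnj : n' < j
            · exact hl1 n' hn1 hnj
            · have : n' = j := by omega
              rw [this]; exact hba
          · intro m' hm1 hm'
            have := hl2 m' hm1 hm'
            have h2' : pvStep^[j] s2 < pvStep^[j+1] s2 := pvSeq_lt s2 h2 (by omega)
            omega

theorem pvMain_pos (s1 s2 : Int) (h1 : 1 ≤ s1) (h2 : 1 ≤ s2)
    (hr : pvRiver s1 = pvRiver s2) :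
    intersection_sum s1 s2 = intersection_sum_alt s1 s2 := by
  have hA : pvIsRes s1 s2 (intersection_sum s1 s2) := by
    have := pvLoopA_correct s1 s2 h1 h2 20000000 0 (by norm_num)
      (by intro m n hm hm0 _ _; omega)
    simpa [intersection_sum, sum_digits] using this
  have hB : pvIsRes s1 s2 (intersection_sum_alt s1 s2) := by
    have := pvLoopB_correct s1 s2 h1 h2 40000000 1 1 (by norm_num) (by norm_num)
      (by norm_num) (by norm_num) (by norm_num)
      (by intro m n hm hmi hn hnj hne; omega)
      (by intro n hn hnj; omega) (by intro m hm hmi; omega)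
    simpa [intersection_sum_alt, hr, Function.iterate_one, pvStep] using this
  exact pvIsRes_unique s1 s2 _ _ hA hB

theorem pvMain_zero : intersection_sum 0 0 = intersection_sum_alt 0 0 := by
  have hd0 : digit_sum 0 = 0 := by rfl
  have hr0 : pvReduceDigits 0 = 0 := by rfl
  have hA : intersection_sum 0 0 = 0 := by
    rw [intersection_sum, show (20000000 : Nat) = Nat.succ 19999999 from rfl]
    simp [loopA, sum_digits, hr0]
  have hB : intersection_sum_alt 0 0 = 0 := by
    rw [intersection_sum_alt, if_neg (by simp), show (40000000 : Nat) = Nat.succ 39999999 from rfl]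
    simp [loopB, hd0]
  rw [hA, hB]

-- mixed zero cases: one sequence is constantly 0, the other strictly positive, so no match
theorem pvLoopA_zleft : ∀ (k : Nat) (x : Int) (l1 l2 : List Int), 1 ≤ x →
    (∀ y ∈ l1, y = 0) → (∀ y ∈ l2, 1 ≤ y) →
    loopA k 0 x 0 (pvReduceDigits x) l1 l2 = 0 := by
  intro k
  induction k with
  | zero => intro x l1 l2 _ _ _; rfl
  | succ m ih =>
    intro x l1 l2 hx h1 h2
    have hds : 1 ≤ pvReduceDigits x := by rw [pvReduce_eq]; exact pvDs_pos x hx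
    simp only [loopA]
    rw [if_neg, if_neg]
    · have h1' : ∀ y ∈ l1 ++ [(0 : Int) + 0], y = 0 := by
        intro y hy; rcases List.mem_append.mp hy with h | h
        · exact h1 y h
        · simp at h; omega
      have h2' : ∀ y ∈ l2 ++ [x + pvReduceDigits x], 1 ≤ y := by
        intro y hy; rcases List.mem_append.mp hy with h | h
        · exact h2 y h
        · simp at h; omega
      have := ih (x + pvReduceDigits x) (l1 ++ [0 + 0]) (l2 ++ [x + pvReduceDigits x])
        (by omega) h1' h2'
      simpa [sum_digits, show ((0:Int) + 0) = 0 from rfl] using this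
    · intro hmem
      rcases List.mem_append.mp hmem with h | h
      · have := h1 _ h; omega
      · simp at h; omega
    · intro hmem
      rcases List.mem_append.mp hmem with h | h
      · have := h2 _ h; omega
      · simp at h; omega

theorem pvLoopA_zright : ∀ (k : Nat) (x : Int) (l1 l2 : List Int), 1 ≤ x →
    (∀ y ∈ l1, 1 ≤ y) → (∀ y ∈ l2, y = 0) →
    loopA k x 0 (pvReduceDigits x) 0 l1 l2 = 0 := by
  intro k
  induction k with
  | zero => intro x l1 l2 _ _ _; rfl
  | succ m ih =>
    intro x l1 l2 hx h1 h2
    have hds : 1 ≤ pvReduceDigits x := by rw [pvReduce_eq]; exact pvDs_pos x hx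
    simp only [loopA]
    rw [if_neg, if_neg]
    · have h1' : ∀ y ∈ l1 ++ [x + pvReduceDigits x], 1 ≤ y := by
        intro y hy; rcases List.mem_append.mp hy with h | h
        · exact h1 y h
        · simp at h; omega
      have h2' : ∀ y ∈ l2 ++ [(0 : Int) + 0], y = 0 := by
        intro y hy; rcases List.mem_append.mp hy with h | h
        · exact h2 y h
        · simp at h; omega
      have := ih (x + pvReduceDigits x) (l1 ++ [x + pvReduceDigits x]) (l2 ++ [0 + 0])
        (by omega) h1' h2'
      simpa [sum_digits, show ((0:Int) + 0) = 0 from rfl] using this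
    · intro hmem
      rcases List.mem_append.mp hmem with h | h
      · have := h1 _ h; omega
      · simp at h; omega
    · intro hmem
      rcases List.mem_append.mp hmem with h | h
      · have := h2 _ h; omega
      · simp at h; omega

-- A returns 0 on the mixed zero inputs: the zero sequence never matches a positive one
theorem pvA_zleft (s2 : Int) (h2 : 1 ≤ s2) : intersection_sum 0 s2 = 0 := by
  have hr0 : pvReduceDigits 0 = 0 := by rfl
  rw [intersection_sum]
  simpa [sum_digits, hr0] using
    pvLoopA_zleft 20000000 s2 [] [] h2 (by simp) (by simp)

theorem pvA_zright (s1 : Int) (h1 : 1 ≤ s1) : intersection_sum s1 0 = 0 := by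
  have hr0 : pvReduceDigits 0 = 0 := by rfl
  rw [intersection_sum]
  simpa [sum_digits, hr0] using
    pvLoopA_zright 20000000 s1 [] [] h1 (by simp) (by simp)

-- the mod-9 invariant behind B's river shortcut: digit_sum x ≡ x (mod 9)
theorem pvDs_mod9 (x : Int) (hx : 0 ≤ x) : digit_sum x % 9 = x % 9 := by
  rw [pvDs_eq x hx]
  have h := Nat.modEq_digits_sum 9 10 (by norm_num) x.toNat
  have h9 : (Nat.digits 10 x.toNat).sum % 9 = x.toNat % 9 := h.symm
  have hx' : (x.toNat : Int) = x := Int.toNat_of_nonneg hx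
  omega

def pvRiverRes (r : Int) : Int :=
  if r = 0 then 2 else if r = 3 ∨ r = 6 then 1 else 0

theorem pvRiver_posval (n : Int) (hn : 1 ≤ n) : pvRiver n = pvRiverRes (n % 9) := by
  unfold pvRiver pvRiverRes
  rw [if_neg (by omega)]

theorem pvRiverRes_double (r : Int) (hr : 0 ≤ r) (hr9 : r < 9) :
    pvRiverRes ((2 * r) % 9) = pvRiverRes r := by
  interval_cases r <;> rfl

theorem pvRiver_step (x : Int) (hx : 1 ≤ x) : pvRiver (pvStep x) = pvRiver x := by
  have hds : digit_sum x % 9 = x % 9 := pvDs_mod9 x (by omega)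
  have hds1 : 1 ≤ digit_sum x := pvDs_pos x hx
  have hstep : pvStep x = x + digit_sum x := rfl
  have hx1 : 1 ≤ pvStep x := by rw [hstep]; omega
  rw [pvRiver_posval _ hx1, pvRiver_posval _ hx, hstep]
  have hmod : (x + digit_sum x) % 9 = (2 * (x % 9)) % 9 := by omega
  rw [hmod, pvRiverRes_double (x % 9) (Int.emod_nonneg x (by norm_num))
    (Int.emod_lt_of_pos x (by norm_num))]

theorem pvRiver_iter (s : Int) (hs : 1 ≤ s) : ∀ k : ℕ, pvRiver (pvStep^[k] s) = pvRiver s := by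
  intro k
  induction k with
  | zero => rfl
  | succ k ih =>
    rw [Function.iterate_succ_apply', pvRiver_step _ (pvSeq_ge s hs k), ih]

theorem pvNoCommon_river (s1 s2 : Int) (h1 : 1 ≤ s1) (h2 : 1 ≤ s2)
    (hne : pvRiver s1 ≠ pvRiver s2) : ∀ w, ¬ pvCommon s1 s2 w := by
  rintro w ⟨m, n, _, _, _, _, hw1, hw2⟩
  apply hne
  rw [← pvRiver_iter s1 h1 m, ← pvRiver_iter s2 h2 n, hw1, hw2]

theorem pvA_riverne (s1 s2 : Int) (h1 : 1 ≤ s1) (h2 : 1 ≤ s2)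
    (hne : pvRiver s1 ≠ pvRiver s2) : intersection_sum s1 s2 = 0 := by
  have hA : pvIsRes s1 s2 (intersection_sum s1 s2) := by
    have := pvLoopA_correct s1 s2 h1 h2 20000000 0 (by norm_num)
      (by intro m n hm hm0 _ _; omega)
    simpa [intersection_sum, sum_digits] using this
  rcases hA with ⟨hc, _⟩ | ⟨_, he⟩
  · exact absurd hc (pvNoCommon_river s1 s2 h1 h2 hne _)
  · exact he

theorem pvRiver_pos_ne3 (n : Int) (hn : 1 ≤ n) : pvRiver n ≠ 3 := by
  rw [pvRiver_posval n hn]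
  unfold pvRiverRes
  split_ifs <;> omega

-- ===== VERDICT (by name: the statement is the Claim_ definition above) =====
theorem intersection_sum_spec : Claim_equal_intersection_sum := by
  intro s1 s2 _ pre
  obtain ⟨hs1, hs2⟩ := pre
  unfold Spec_intersection_sum
  by_cases hr : pvRiver s1 = pvRiver s2
  · by_cases h0 : s1 = 0
    · subst h0
      by_cases h0' : s2 = 0
      · subst h0'; exact pvMain_zero
      · exact absurd hr.symm (pvRiver_pos_ne3 s2 (by omega))
    · by_cases h0' : s2 = 0
      · subst h0'; exact absurd hr (pvRiver_pos_ne3 s1 (by omega))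
      · exact pvMain_pos s1 s2 (by omega) (by omega) hr
  · rw [intersection_sum_alt, if_pos hr]
    by_cases h0 : s1 = 0
    · subst h0
      by_cases h0' : s2 = 0
      · subst h0'; exact absurd rfl hr
      · exact pvA_zleft s2 (by omega)
    · by_cases h0' : s2 = 0
      · subst h0'; exact pvA_zright s1 (by omega)
      · exact pvA_riverne s1 s2 (by omega) (by omega) hr
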